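-- pv_equiv track=rewrite | github.com/NetManAIOps/PSqueeze | Adtributor/r_adtributor_derived.py | tree_to_root_cause
-- ===== SOURCE A (Python) =====
-- def tree_to_root_cause(tree_list: list, dim_list: list, rt_cause_nm):
--     rt_cause = ""
--     if len(tree_list) >= 1:
--         tree_list.sort(key=lambda dicts: dicts["surprise"], reverse=True)
--         start_flag = True
--         for dd in dim_list:
--             if tree_list[0][dd] != "":
--                 if start_flag:
--                     start_flag = False
--                 else:
--                     rt_cause += '&'
--                 rt_cause += dd + '=' + tree_list[0][dd]
--         # if rt_cause_nm >= 2: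
--         #     rt_cause += ';'
--         rt_cause_count = 1
--         tree_list_count = 1
--         while (rt_cause_count < rt_cause_nm) and (tree_list_count < len(tree_list)):
--             start_flag = False
--             for dd in dim_list:
--                 if tree_list[tree_list_count][dd] != tree_list[tree_list_count - 1][dd]:
--                     start_flag = True
--             if start_flag:
--                 for dd in dim_list:
--                     if tree_list[tree_list_count][dd] != "":
--                         if start_flag:
--                             start_flag = False
--                             rt_cause += ';'
--                         else:
--                             rt_cause += '&'
--                         rt_cause += dd + '=' + tree_list[tree_list_count][dd]
--                 rt_cause_count += 1
--                 # if rt_cause_count < rt_cause_nm: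
--                 #     rt_cause += ';'
--             tree_list_count += 1
--     return rt_cause
-- ===== SOURCE B (Python) =====
-- def tree_to_root_cause(tree_list: list, dim_list: list, rt_cause_nm):
--     # Different strategy: project every row to its tuple of dimension values once,
--     # run-length–deduplicate that key sequence (consecutive duplicates collapse),
--     # truncate to max(rt_cause_nm, 1) keys, and format the surviving tuples.
--     # No per-dimension comparison loop, no while loop with a cause counter.
--     # Like A, sorts tree_list in place; the claim is about the return value.
--     if not tree_list:
--         return ""
--     tree_list.sort(key=lambda dicts: dicts["surprise"], reverse=True)
--     keys = [tuple(r[dd] for dd in dim_list) for r in tree_list]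
--     runs = []
--     for k in keys:
--         if not runs or runs[-1] != k:
--             runs.append(k)
--     take = runs[:max(rt_cause_nm, 1)]
--     segs = ['&'.join(dd + '=' + v for dd, v in zip(dim_list, k) if v != "") for k in take]
--     out = segs[0]
--     for s in segs[1:]:
--         if s != "":
--             out += ';' + s
--     return out
-- ===== Notes on version B (the rewrite author's own statement) =====
-- stated objective: alternative
-- what changed: A walks the sorted rows with a while loop, a cause counter and start_flag toggles, comparing each row to its predecessor dimension by dimension while appending to the string; B instead projects every row once to its tuple of dimension values, run-length-deduplicates that key sequence, truncates it to max(rt_cause_nm,1) tuples, and formats the surviving tuples, so the rows themselves, the counter and the per-dimension comparison loop disappear.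
-- outside the precondition, e.g. on tree_to_root_cause([{'surprise': '2', 'a': 'x'}, {'surprise': '1'}], ['a'], 1): A returns 'a=x', B raises KeyError
import Mathlib
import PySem

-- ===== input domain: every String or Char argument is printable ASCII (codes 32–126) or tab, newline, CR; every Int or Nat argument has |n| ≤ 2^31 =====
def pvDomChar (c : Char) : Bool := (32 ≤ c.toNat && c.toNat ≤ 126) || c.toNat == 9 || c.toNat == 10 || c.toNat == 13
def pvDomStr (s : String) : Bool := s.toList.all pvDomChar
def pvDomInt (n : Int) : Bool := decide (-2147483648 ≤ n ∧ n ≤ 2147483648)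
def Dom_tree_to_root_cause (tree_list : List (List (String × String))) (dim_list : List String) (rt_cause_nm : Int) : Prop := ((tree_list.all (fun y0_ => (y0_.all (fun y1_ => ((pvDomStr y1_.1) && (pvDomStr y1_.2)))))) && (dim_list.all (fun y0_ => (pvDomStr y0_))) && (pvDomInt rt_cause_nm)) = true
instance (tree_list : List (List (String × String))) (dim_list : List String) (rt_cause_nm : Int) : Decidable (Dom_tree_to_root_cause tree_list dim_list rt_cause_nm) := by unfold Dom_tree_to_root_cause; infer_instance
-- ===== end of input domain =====

-- B projects each row to its tuple of dimension values, run-length-deduplicates that key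
-- sequence, truncates and formats it (A walks rows with a while loop, counter and flag toggles);
-- return-value equivalence is what is proved — both Pythons also sort tree_list in place the same way.

-- ===== PORT A =====
-- dict lookup tree_list[i][dd]: first match in the association list; Pre_ guarantees the key is
-- present, so the `getD ""` default is never taken on admitted inputs (KeyError is excluded by Pre_).
def pvGetKey (row : List (String × String)) (k : String) : String :=
  (row.lookup k).getD ""

-- sort key: lambda dicts: dicts["surprise"]
def pvSurprise (row : List (String × String)) : String := pvGetKey row "surprise"

-- the while loop of A, step for step; state (rt_cause, rt_cause_count, tree_list_count)
def pvLoopA (ts : List (List (String × String))) (dim_list : List String) (rt_cause_nm : Int)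
    (rc : String) (cnt : Int) (i : Nat) : String :=
  if h : cnt < rt_cause_nm ∧ i < ts.length then
    -- start_flag = False; for dd: if tree[i][dd] != tree[i-1][dd]: start_flag = True
    if dim_list.foldl
        (fun f dd => if pvGetKey (ts.getD i []) dd ≠ pvGetKey (ts.getD (i - 1) []) dd then true else f)
        false then
      -- for dd: if value != "": ';' the first time (start_flag), '&' afterwards
      pvLoopA ts dim_list rt_cause_nm
        (dim_list.foldl
          (fun (p : String × Bool) dd =>
            if pvGetKey (ts.getD i []) dd ≠ "" then
              if p.2 then (p.1 ++ ";" ++ dd ++ "=" ++ pvGetKey (ts.getD i []) dd, false)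
              else (p.1 ++ "&" ++ dd ++ "=" ++ pvGetKey (ts.getD i []) dd, false)
            else p)
          (rc, true)).1
        (cnt + 1) (i + 1)
    else pvLoopA ts dim_list rt_cause_nm rc cnt (i + 1)
  else rc
termination_by ts.length - i
decreasing_by all_goals omega

def tree_to_root_cause (tree_list : List (List (String × String))) (dim_list : List String) (rt_cause_nm : Int) : String :=
  if 1 ≤ tree_list.length then
    -- tree_list.sort(...) mutates in Python; here the sorted list is written out at each use
    -- first row: start_flag toggles between no separator and '&'
    pvLoopA (PySem.List.sorted tree_list pvSurprise true) dim_list rt_cause_nm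
      (dim_list.foldl
        (fun (p : String × Bool) dd =>
          if pvGetKey ((PySem.List.sorted tree_list pvSurprise true).getD 0 []) dd ≠ "" then
            if p.2 then
              (p.1 ++ dd ++ "=" ++ pvGetKey ((PySem.List.sorted tree_list pvSurprise true).getD 0 []) dd, false)
            else
              (p.1 ++ "&" ++ dd ++ "=" ++ pvGetKey ((PySem.List.sorted tree_list pvSurprise true).getD 0 []) dd, false)
          else p)
        ("", true)).1
      1 1
  else ""

-- ===== PORT B =====
-- tuple(r[dd] for dd in dim_list): the row's key tuple
def pvKeyOf (dim_list : List String) (r : List (String × String)) : List String :=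
  dim_list.map (fun dd => pvGetKey r dd)

-- '&'.join(dd + '=' + v for dd, v in zip(dim_list, k) if v != "")
def pvSegK (dim_list : List String) (k : List String) : String :=
  match (dim_list.zip k).filterMap (fun p => if p.2 ≠ "" then some (p.1 ++ "=" ++ p.2) else none) with
  | [] => ""
  | p :: ps => ps.foldl (fun a s => a ++ "&" ++ s) p

def tree_to_root_cause_alt (tree_list : List (List (String × String))) (dim_list : List String) (rt_cause_nm : Int) : String :=
  if tree_list = [] then ""
  else
    -- keys = [tuple(...) for r in sorted rows]; runs = consecutive dedup; take = runs[:max(nm,1)]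
    match ((((PySem.List.sorted tree_list pvSurprise true).map (pvKeyOf dim_list)).foldl
        (fun runs k => if runs.getLast? = some k then runs else runs ++ [k])
        ([] : List (List String))).take (max rt_cause_nm 1).toNat).map (pvSegK dim_list) with
    | [] => ""
    | s0 :: rest => rest.foldl (fun a s => if s ≠ "" then a ++ ";" ++ s else a) s0

-- ===== PRECONDITION & SPEC =====
-- A raises KeyError when an accessed row lacks "surprise" or a dimension key; Pre_ requires every
-- row to carry all of them.  This is slightly narrower than A's exact raise set (a row the while
-- loop never reaches — e.g. once rt_cause_nm causes are collected — may lack a dimension key and A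
-- still returns, while B projects every row), because which rows A accesses depends on the run.
def Pre_tree_to_root_cause (tree_list : List (List (String × String))) (dim_list : List String) (rt_cause_nm : Int) : Prop :=
  (tree_list.all (fun r =>
    (r.lookup "surprise").isSome && dim_list.all (fun dd => (r.lookup dd).isSome))) = true
instance (tree_list : List (List (String × String))) (dim_list : List String) (rt_cause_nm : Int) : Decidable (Pre_tree_to_root_cause tree_list dim_list rt_cause_nm) := by unfold Pre_tree_to_root_cause; infer_instance

def pvWitness_tree_to_root_cause : (List (List (String × String))) × List String × Int :=
  ([[("surprise", "2"), ("a", "x"), ("b", "")], [("surprise", "1"), ("a", "y"), ("b", "z")]],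
   ["a", "b"], 2)

def Spec_tree_to_root_cause (tree_list : List (List (String × String))) (dim_list : List String) (rt_cause_nm : Int) (out : String) : Prop := out = tree_to_root_cause_alt tree_list dim_list rt_cause_nm
instance (tree_list : List (List (String × String))) (dim_list : List String) (rt_cause_nm : Int) (out : String) : Decidable (Spec_tree_to_root_cause tree_list dim_list rt_cause_nm out) := by unfold Spec_tree_to_root_cause; infer_instance

-- ===== CLAIM (what is proved, stated in full; the proofs are below) =====
def Claim_equal_tree_to_root_cause : Prop := ∀ (tree_list : List (List (String × String))) (dim_list : List String) (rt_cause_nm : Int), Dom_tree_to_root_cause tree_list dim_list rt_cause_nm → Pre_tree_to_root_cause tree_list dim_list rt_cause_nm → Spec_tree_to_root_cause tree_list dim_list rt_cause_nm (tree_to_root_cause tree_list dim_list rt_cause_nm)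

-- ===== LEMMAS AND PROOFS =====

-- "&p1&p2…" — the tail of a '&'-join
def pvAmp : List String → String
  | [] => ""
  | p :: ps => "&" ++ p ++ pvAmp ps

-- the nonempty "dd=v" parts of a key tuple
def pvPartsK (dim_list : List String) (k : List String) : List String :=
  (dim_list.zip k).filterMap (fun p => if p.2 ≠ "" then some (p.1 ++ "=" ++ p.2) else none)

-- ';seg' contributed by one selected key (a key with only empty values contributes nothing)
def pvSemiK (dim_list : List String) (k : List String) : String :=
  match pvPartsK dim_list k with
  | [] => ""
  | p :: ps => ";" ++ p ++ pvAmp ps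

def pvFmtK (dim_list : List String) : List (List String) → String
  | [] => ""
  | k :: ks => pvSemiK dim_list k ++ pvFmtK dim_list ks

-- consecutive dedup, recursively (the reasoning form of B's runs loop)
def pvDedupA (p : List String) : List (List String) → List (List String)
  | [] => []
  | k :: ks => if k = p then pvDedupA p ks else k :: pvDedupA k ks

-- the keys A's while loop selects from state (prev key, remaining keys, remaining budget)
def pvSel (prev : List String) (l : List (List String)) (b : Int) : List (List String) :=
  match l with
  | [] => []
  | k :: ks => if b ≤ 0 then [] else if k = prev then pvSel k ks b else k :: pvSel k ks (b - 1)

theorem pvJoin_eq (ps : List String) (p : String) :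
    ps.foldl (fun a s => a ++ "&" ++ s) p = p ++ pvAmp ps := by
  induction ps generalizing p with
  | nil => simp [pvAmp]
  | cons q qs ih =>
    simp only [List.foldl_cons]
    rw [ih, pvAmp]
    simp [String.append_assoc]

theorem pvSegK_eq (dim_list : List String) (k : List String) :
    pvSegK dim_list k = match pvPartsK dim_list k with
      | [] => ""
      | p :: ps => p ++ pvAmp ps := by
  unfold pvSegK
  rw [show (dim_list.zip k).filterMap
      (fun p => if p.2 ≠ "" then some (p.1 ++ "=" ++ p.2) else none) = pvPartsK dim_list k from rfl]
  cases pvPartsK dim_list k with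
  | nil => rfl
  | cons p ps => simp [pvJoin_eq]

theorem pvPartsK_ne_empty (dim_list : List String) (k : List String) (s : String)
    (hs : s ∈ pvPartsK dim_list k) : s ≠ "" := by
  unfold pvPartsK at hs
  rw [List.mem_filterMap] at hs
  obtain ⟨p, _, hp⟩ := hs
  by_cases hv : p.2 ≠ ""
  · rw [if_pos hv] at hp
    intro hcontra
    have : (p.1 ++ "=" ++ p.2).toList = ("" : String).toList := by
      rw [Option.some_inj] at hp; rw [hp, hcontra]
    simp at this
  · rw [if_neg hv] at hp; exact absurd hp (by simp)

-- the parts of a projected key are A's per-row parts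
theorem pvPartsK_map (dim_list : List String) (g : String → String) :
    pvPartsK dim_list (dim_list.map g)
      = dim_list.filterMap (fun dd => if g dd ≠ "" then some (dd ++ "=" ++ g dd) else none) := by
  induction dim_list with
  | nil => rfl
  | cons dd ds ih =>
    unfold pvPartsK at *
    simp only [List.map_cons, List.zip_cons_cons, List.filterMap_cons]
    rw [ih]

-- A's formatting fold over the remaining dims once the first part is out (flag = false)
theorem pvFoldA_false (sep : String) (g : String → String) (dim_list : List String) (rc : String) :
    dim_list.foldl
      (fun (p : String × Bool) dd =>
        if g dd ≠ "" then
          if p.2 then (p.1 ++ sep ++ dd ++ "=" ++ g dd, false)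
          else (p.1 ++ "&" ++ dd ++ "=" ++ g dd, false)
        else p)
      (rc, false)
    = (rc ++ pvAmp (dim_list.filterMap
        (fun dd => if g dd ≠ "" then some (dd ++ "=" ++ g dd) else none)), false) := by
  induction dim_list generalizing rc with
  | nil => simp [pvAmp]
  | cons dd ds ih =>
    simp only [List.foldl_cons, List.filterMap_cons]
    split_ifs with h1 h2
    · simp at h2
    · rw [ih, pvAmp]
      simp [String.append_assoc]
    · rw [ih]

-- A's formatting fold from a fresh flag: `sep` goes before the first part only
theorem pvFoldA_true (sep : String) (g : String → String) (dim_list : List String) (rc : String) :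
    (dim_list.foldl
      (fun (p : String × Bool) dd =>
        if g dd ≠ "" then
          if p.2 then (p.1 ++ sep ++ dd ++ "=" ++ g dd, false)
          else (p.1 ++ "&" ++ dd ++ "=" ++ g dd, false)
        else p)
      (rc, true)).1
    = rc ++ (match dim_list.filterMap
        (fun dd => if g dd ≠ "" then some (dd ++ "=" ++ g dd) else none) with
      | [] => ""
      | p :: ps => sep ++ p ++ pvAmp ps) := by
  induction dim_list generalizing rc with
  | nil => simp
  | cons dd ds ih =>
    simp only [List.foldl_cons, List.filterMap_cons]
    split_ifs with h1
    · rw [pvFoldA_false]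
      simp [String.append_assoc]
    · rw [ih]

-- flag already false: the first-row fold behaves the same way (lemma repeated for its lambda)
theorem pvFold1_false (g : String → String) (dim_list : List String) (rc : String) :
    dim_list.foldl
      (fun (p : String × Bool) dd =>
        if g dd ≠ "" then
          if p.2 then (p.1 ++ dd ++ "=" ++ g dd, false)
          else (p.1 ++ "&" ++ dd ++ "=" ++ g dd, false)
        else p)
      (rc, false)
    = (rc ++ pvAmp (dim_list.filterMap
        (fun dd => if g dd ≠ "" then some (dd ++ "=" ++ g dd) else none)), false) := by
  induction dim_list generalizing rc with
  | nil => simp [pvAmp]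
  | cons dd ds ih =>
    simp only [List.foldl_cons, List.filterMap_cons]
    split_ifs with h1 h2
    · simp at h2
    · rw [ih, pvAmp]
      simp [String.append_assoc]
    · rw [ih]

-- the same fold with no separator before the first part (A's first-row fold)
theorem pvFold1_true (g : String → String) (dim_list : List String) (rc : String) :
    (dim_list.foldl
      (fun (p : String × Bool) dd =>
        if g dd ≠ "" then
          if p.2 then (p.1 ++ dd ++ "=" ++ g dd, false)
          else (p.1 ++ "&" ++ dd ++ "=" ++ g dd, false)
        else p)
      (rc, true)).1
    = rc ++ (match dim_list.filterMap
        (fun dd => if g dd ≠ "" then some (dd ++ "=" ++ g dd) else none) with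
      | [] => ""
      | p :: ps => p ++ pvAmp ps) := by
  induction dim_list generalizing rc with
  | nil => simp
  | cons dd ds ih =>
    simp only [List.foldl_cons, List.filterMap_cons]
    split_ifs with h1
    · rw [pvFold1_false]
      simp [String.append_assoc]
    · rw [ih]

-- A's difference-detecting flag fold is List.any
theorem pvDiffer_eq (dim_list : List String) (p : String → Prop) [DecidablePred p] (b : Bool) :
    dim_list.foldl (fun f dd => if p dd then true else f) b
      = (b || dim_list.any (fun dd => decide (p dd))) := by
  induction dim_list generalizing b with
  | nil => simp
  | cons dd ds ih =>
    simp only [List.foldl_cons, List.any_cons]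
    by_cases h : p dd
    · rw [if_pos h, ih]
      simp [h]
    · rw [if_neg h, ih]
      simp [h]

-- some dimension differs iff the projected key tuples differ
theorem pvAny_ne_iff (dim_list : List String) (g h : String → String) :
    (dim_list.any (fun dd => decide (g dd ≠ h dd)) = true) ↔ dim_list.map g ≠ dim_list.map h := by
  rw [Ne, List.map_eq_map_iff]
  simp only [List.any_eq_true, decide_eq_true_eq]
  push Not
  rfl

-- A's while loop formats exactly the selected keys
theorem pvLoopA_eq_aux (ts : List (List (String × String))) (dim_list : List String)
    (rt_cause_nm : Int) (n : Nat) :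
    ∀ (rc : String) (cnt : Int) (i : Nat), ts.length - i ≤ n →
      pvLoopA ts dim_list rt_cause_nm rc cnt i
        = rc ++ pvFmtK dim_list
            (pvSel (pvKeyOf dim_list (ts.getD (i - 1) []))
              ((ts.map (pvKeyOf dim_list)).drop i) (rt_cause_nm - cnt)) := by
  induction n with
  | zero =>
    intro rc cnt i hle
    have h : ¬(cnt < rt_cause_nm ∧ i < ts.length) := by omega
    have hi : i ≥ ts.length := by omega
    rw [pvLoopA]
    rw [dif_neg h]
    rw [List.drop_eq_nil_of_le (by simpa using hi)]
    simp [pvSel, pvFmtK]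
  | succ n ih =>
    intro rc cnt i hle
    rw [pvLoopA]
    by_cases h : cnt < rt_cause_nm ∧ i < ts.length
    · rw [dif_pos h]
      have hdrop : (ts.map (pvKeyOf dim_list)).drop i
          = pvKeyOf dim_list (ts.getD i []) :: (ts.map (pvKeyOf dim_list)).drop (i + 1) := by
        have hlen : i < (ts.map (pvKeyOf dim_list)).length := by simpa using h.2
        rw [List.drop_eq_getElem_cons hlen]
        congr 1
        rw [List.getElem_map]
        congr 1
        exact (List.getD_eq_getElem ts [] h.2).symm
      have hflag := pvDiffer_eq dim_list
        (fun dd => pvGetKey (ts.getD i []) dd ≠ pvGetKey (ts.getD (i - 1) []) dd) false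
      have hiff := pvAny_ne_iff dim_list
        (fun dd => pvGetKey (ts.getD i []) dd) (fun dd => pvGetKey (ts.getD (i - 1) []) dd)
      by_cases hd : dim_list.map (fun dd => pvGetKey (ts.getD i []) dd)
          ≠ dim_list.map (fun dd => pvGetKey (ts.getD (i - 1) []) dd)
      · rw [if_pos (by rw [hflag]; simpa using hiff.mpr hd)]
        rw [ih _ _ _ (by omega)]
        rw [hdrop]
        rw [pvSel]
        rw [if_neg (by omega), if_neg (by unfold pvKeyOf; exact hd)]
        rw [pvFmtK]
        rw [pvFoldA_true ";" (fun dd => pvGetKey (ts.getD i []) dd) dim_list rc]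
        rw [show (match (dim_list.filterMap fun dd =>
              if pvGetKey (ts.getD i []) dd ≠ "" then
                some (dd ++ "=" ++ pvGetKey (ts.getD i []) dd) else none) with
            | [] => ""
            | p :: ps => ";" ++ p ++ pvAmp ps)
            = pvSemiK dim_list (pvKeyOf dim_list (ts.getD i [])) by
          unfold pvSemiK pvKeyOf
          rw [pvPartsK_map]]
        rw [show (i + 1 - 1) = i from rfl]
        rw [show rt_cause_nm - (cnt + 1) = rt_cause_nm - cnt - 1 by ring]
        rw [String.append_assoc]
      · rw [if_neg (by
          intro hc
          rw [hflag] at hc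
          simp only [Bool.false_or] at hc
          exact hd (hiff.mp hc))]
        rw [ih _ _ _ (by omega)]
        rw [hdrop]
        conv_rhs => rw [pvSel]
        rw [if_neg (by omega)]
        rw [if_pos (by unfold pvKeyOf; exact not_not.mp hd)]
        rw [show (i + 1 - 1) = i from rfl]
    · rw [dif_neg h]
      rcases not_and_or.mp h with hb | hi
      · cases hl : (ts.map (pvKeyOf dim_list)).drop i with
        | nil => simp [pvSel, pvFmtK]
        | cons k ks =>
          rw [pvSel, if_pos (by omega)]
          simp [pvFmtK]
      · rw [List.drop_eq_nil_of_le (by simp; omega)]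
        simp [pvSel, pvFmtK]

theorem pvLoopA_eq (ts : List (List (String × String))) (dim_list : List String)
    (rt_cause_nm : Int) (rc : String) (cnt : Int) (i : Nat) :
    pvLoopA ts dim_list rt_cause_nm rc cnt i
      = rc ++ pvFmtK dim_list
          (pvSel (pvKeyOf dim_list (ts.getD (i - 1) []))
            ((ts.map (pvKeyOf dim_list)).drop i) (rt_cause_nm - cnt)) :=
  pvLoopA_eq_aux ts dim_list rt_cause_nm (ts.length - i) rc cnt i le_rfl

-- B's runs fold is the recursive consecutive dedup
theorem pvRuns_fold_eq (l : List (List String)) :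
    ∀ (acc : List (List String)) (p : List String), acc.getLast? = some p →
      l.foldl (fun runs k => if runs.getLast? = some k then runs else runs ++ [k]) acc
        = acc ++ pvDedupA p l := by
  induction l with
  | nil => intro acc p _; simp [pvDedupA]
  | cons k ks ih =>
    intro acc p hp
    simp only [List.foldl_cons]
    by_cases hk : k = p
    · subst hk
      rw [if_pos hp, pvDedupA, if_pos rfl]
      exact ih acc k hp
    · rw [if_neg (by rw [hp]; simp only [Option.some.injEq]; exact fun e => hk e.symm),
        pvDedupA, if_neg hk]
      rw [ih (acc ++ [k]) k (by simp)]
      simp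
theorem pvRuns_eq (k0 : List String) (krest : List (List String)) :
    (k0 :: krest).foldl (fun runs k => if runs.getLast? = some k then runs else runs ++ [k])
        ([] : List (List String))
      = k0 :: pvDedupA k0 krest := by
  simp only [List.foldl_cons, List.getLast?_nil]
  rw [if_neg (by simp), List.nil_append, pvRuns_fold_eq krest [k0] k0 (by simp)]
  simp

-- the selection is a prefix of the dedup
theorem pvSel_eq_take (l : List (List String)) :
    ∀ (p : List String) (b : Int), pvSel p l b = (pvDedupA p l).take b.toNat := by
  induction l with
  | nil => intro p b; simp [pvSel, pvDedupA]
  | cons k ks ih =>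
    intro p b
    rw [pvSel, pvDedupA]
    by_cases hb : b ≤ 0
    · rw [if_pos hb]
      have : b.toNat = 0 := by omega
      simp [this]
    · rw [if_neg hb]
      by_cases hk : k = p
      · rw [if_pos hk, if_pos hk, ih]
        subst hk; rfl
      · rw [if_neg hk, if_neg hk, ih]
        have : b.toNat = (b - 1).toNat + 1 := by omega
        rw [this, List.take_succ_cons]

-- B's final formatting fold = pvFmtK
theorem pvFoldB_eq (dim_list : List String) (ks : List (List String)) (a : String) :
    (ks.map (pvSegK dim_list)).foldl (fun a s => if s ≠ "" then a ++ ";" ++ s else a) a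
      = a ++ pvFmtK dim_list ks := by
  induction ks generalizing a with
  | nil => simp [pvFmtK]
  | cons k ks ih =>
    simp only [List.map, List.foldl, ih, pvFmtK]
    rw [pvSegK_eq]
    cases hp : pvPartsK dim_list k with
    | nil => simp [pvSemiK, hp]
    | cons p ps =>
      have hpne : p ≠ "" := pvPartsK_ne_empty dim_list k p (by rw [hp]; exact List.mem_cons_self ..)
      have hne : p ++ pvAmp ps ≠ "" := by
        intro hcontra
        apply hpne
        have := congrArg String.toList hcontra
        simp at this
        exact this.1
      simp [pvSemiK, hp, hne, String.append_assoc]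

theorem pvBudget_toNat (rt : Int) : (rt - 1).toNat = (max rt 1).toNat - 1 := by
  omega

-- ===== VERDICT (by name: the statement is the Claim_ definition above) =====
theorem tree_to_root_cause_spec : Claim_equal_tree_to_root_cause := by
  intro tree_list dim_list rt_cause_nm _ _
  unfold Spec_tree_to_root_cause tree_to_root_cause tree_to_root_cause_alt
  by_cases htl : tree_list = []
  · subst htl
    simp
  · have hl : 1 ≤ tree_list.length := by
      cases tree_list with
      | nil => exact absurd rfl htl
      | cons _ _ => simp
    rw [if_pos hl, if_neg htl]
    have hts : 1 ≤ (PySem.List.sorted tree_list pvSurprise true).length := by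
      rw [PySem.List.length_sorted]; exact hl
    cases hsort : PySem.List.sorted tree_list pvSurprise true with
    | nil => rw [hsort] at hts; simp at hts
    | cons t0 ttail =>
      rw [pvLoopA_eq]
      rw [pvFold1_true (fun dd => pvGetKey ((t0 :: ttail).getD 0 []) dd) dim_list ""]
      simp only [List.map_cons, List.getD_cons_zero, List.drop_succ_cons, List.drop_zero]
      rw [pvRuns_eq]
      rw [pvSel_eq_take]
      have hmax : (max rt_cause_nm 1).toNat = ((max rt_cause_nm 1).toNat - 1) + 1 := by omega
      rw [hmax, List.take_succ_cons, List.map_cons]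
      dsimp only
      rw [pvFoldB_eq]
      unfold pvKeyOf
      rw [pvSegK_eq, pvPartsK_map dim_list (fun dd => pvGetKey t0 dd)]
      rw [pvBudget_toNat]
      cases hm : dim_list.filterMap
          (fun dd => if pvGetKey t0 dd ≠ "" then some (dd ++ "=" ++ pvGetKey t0 dd) else none) with
      | nil => simp
      | cons p ps => simp [String.append_assoc]
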